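-- pv_equiv track=rewrite | github.com/Ritvik19/CodeBook | data/CodeChef/ZCO12002.py | just_smaller
-- ===== SOURCE A (Python) =====
-- def just_smaller(a, e):
--     pos = -1
--     low = 0
--     high = len(a)-1
--     while low <= high:
--         mid = (high+low)//2
--         if a[mid] <= e:
--             pos = a[mid]
--             low = mid + 1
--         else:
--             high = mid - 1
--     return pos
-- ===== SOURCE B (Python) =====
-- def just_smaller(a, e):
--     # Recursive binary search on list slices, threading the best value seen.
--     def search(seg, best):
--         if not seg:
--             return best
--         m = (len(seg) - 1) // 2
--         if seg[m] <= e: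
--             return search(seg[m + 1:], seg[m])
--         return search(seg[:m], best)
--     return search(a, -1)
-- ===== Notes on version B (the rewrite author's own statement) =====
-- stated objective: alternative
-- what changed: Replaced A's while loop over (pos, low, high) index bounds with a recursive divide-and-conquer binary search that recurses on list slices (seg[m+1:] / seg[:m]) and threads the best value seen as an accumulator.
import Mathlib
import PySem

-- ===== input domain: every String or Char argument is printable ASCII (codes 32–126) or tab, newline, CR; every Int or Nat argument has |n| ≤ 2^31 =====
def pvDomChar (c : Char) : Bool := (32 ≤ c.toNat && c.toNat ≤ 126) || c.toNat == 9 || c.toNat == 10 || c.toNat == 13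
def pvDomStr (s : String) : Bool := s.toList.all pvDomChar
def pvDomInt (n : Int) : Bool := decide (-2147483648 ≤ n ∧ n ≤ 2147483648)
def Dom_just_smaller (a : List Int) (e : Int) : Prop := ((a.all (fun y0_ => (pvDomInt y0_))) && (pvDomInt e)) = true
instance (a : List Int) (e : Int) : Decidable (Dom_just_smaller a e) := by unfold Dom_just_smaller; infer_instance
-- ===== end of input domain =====

-- B is an alternative decomposition of the same index path: recursive binary search on list
-- slices threading the best value, instead of A's index-bound while loop; same cost.

-- ===== PORT A =====
-- A's while loop over (pos, low, high). fuel is only a totality guard: a.length + 1 fuel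
-- always outlasts the loop, so the fuel-0 arm is never reached from just_smaller.
-- a[mid] is always in range when reached from just_smaller's initial state, so the
-- `none` (IndexError) arm is unreachable there.
def just_smaller_loop (a : List Int) (e : Int) (fuel : Nat) (pos low high : Int) : Int :=
  match fuel with
  | 0 => pos
  | fuel + 1 =>
    if low ≤ high then
      let mid := PySem.Int.floordiv (high + low) 2
      match PySem.List.pyGet? a mid with
      | some v =>
        if v ≤ e then just_smaller_loop a e fuel v (mid + 1) high
        else just_smaller_loop a e fuel pos low (mid - 1)
      | none => 0
    else pos

def just_smaller (a : List Int) (e : Int) : Int :=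
  just_smaller_loop a e (a.length + 1) (-1) 0 ((a.length : Int) - 1)

-- ===== PORT B =====
-- search(seg, best): binary search recursing on the slices seg[m+1:] / seg[:m]. fuel is
-- only a totality guard (slices shrink, a.length + 1 always suffices); seg[m] is in range
-- whenever seg ≠ [], so the `none` arm is unreachable from just_smaller_alt.
def just_smaller_alt_search (e : Int) (fuel : Nat) (seg : List Int) (best : Int) : Int :=
  match fuel with
  | 0 => best
  | fuel + 1 =>
    if seg = [] then best
    else
      let m : Nat := (seg.length - 1) / 2
      match PySem.List.pyGet? seg (m : Int) with
      | some v =>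
        if v ≤ e then
          just_smaller_alt_search e fuel (PySem.List.slice seg (some ((m : Int) + 1)) none) v
        else
          just_smaller_alt_search e fuel (PySem.List.slice seg none (some (m : Int))) best
      | none => 0

def just_smaller_alt (a : List Int) (e : Int) : Int :=
  just_smaller_alt_search e (a.length + 1) a (-1)

-- ===== PRECONDITION & SPEC =====
def Spec_just_smaller (a : List Int) (e : Int) (out : Int) : Prop := out = just_smaller_alt a e
instance (a : List Int) (e : Int) (out : Int) : Decidable (Spec_just_smaller a e out) := by unfold Spec_just_smaller; infer_instance

-- ===== CLAIM (what is proved, stated in full; the proofs are below) =====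
def Claim_equal_just_smaller : Prop := ∀ (a : List Int) (e : Int), Dom_just_smaller a e → Spec_just_smaller a e (just_smaller a e)

-- ===== LEMMAS AND PROOFS =====

-- A's loop on (low, high) equals B's search on the segment a[low..high].
lemma loop_eq_search (a : List Int) (e : Int) :
    ∀ (fuel : Nat) (pos low high : Int), (high + 1 - low).toNat < fuel → 0 ≤ low →
      high ≤ (a.length : Int) - 1 →
      just_smaller_loop a e fuel pos low high
        = just_smaller_alt_search e fuel ((a.drop low.toNat).take (high + 1 - low).toNat) pos := by
  intro fuel
  induction fuel with
  | zero => intro pos low high hf _ _; omega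
  | succ f ih =>
    intro pos low high hf hlow hhigh
    by_cases h : low ≤ high
    · -- segment is nonempty
      have hlen : ((a.drop low.toNat).take (high + 1 - low).toNat).length
          = (high + 1 - low).toNat := by
        simp only [List.length_take, List.length_drop]
        omega
      set seg := (a.drop low.toNat).take (high + 1 - low).toNat with hseg
      have hne : seg ≠ [] := by
        intro hnil
        rw [hnil] at hlen
        simp at hlen
        omega
      have hmid := PySem.Int.floordiv_two_mid_bounds (lo := low) (hi := high) h
      rw [Int.add_comm] at hmid
      set mid := PySem.Int.floordiv (high + low) 2 with hmiddef
      set m : Nat := (seg.length - 1) / 2 with hm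
      -- the relative midpoint matches: mid = low + m
      have hmval : (m : Int) = mid - low := by
        have h2 : PySem.Int.floordiv (high + low) 2 = (high + low) / 2 :=
          PySem.Int.floordiv_eq_ediv_of_pos (by omega)
        rw [hm, hlen]
        rw [hmiddef, h2]
        omega
      have hmlt : m < seg.length := by rw [hlen]; omega
      have hidx : low.toNat + m = mid.toNat := by omega
      -- both sides read the same element
      have hAget : PySem.List.pyGet? a mid = some (seg[m]'hmlt) := by
        have h0 : 0 ≤ mid := by omega
        have h1 : mid < (a.length : Int) := by omega
        rw [PySem.List.pyGet?_eq_some_getElem a h0 h1]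
        have hg : seg[m]'hmlt = a[mid.toNat]'(by omega) := by
          simp only [hseg, List.getElem_take, List.getElem_drop]
          congr 1
          try omega
        rw [hg]
      have hBget : PySem.List.pyGet? seg (m : Int) = some (seg[m]'hmlt) := by
        rw [PySem.List.pyGet?_natCast]
        simp [hmlt]
      -- the two slices are the segments of the two recursive calls
      have hsegR : PySem.List.slice seg (some ((m : Int) + 1)) none
          = (a.drop (mid + 1).toNat).take (high + 1 - (mid + 1)).toNat := by
        have h1 : ((m : Int) + 1) = (((m + 1 : Nat)) : Int) := by push_cast; ring
        rw [h1, PySem.List.slice_from_natCast, hseg, List.drop_take, List.drop_drop]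
        congr 1
        · omega
        · congr 1
          omega
      have hsegL : PySem.List.slice seg none (some (m : Int))
          = (a.drop low.toNat).take (mid - 1 + 1 - low).toNat := by
        rw [PySem.List.slice_to_natCast, hseg, List.take_take]
        congr 1
        omega
      clear_value seg mid m
      rw [just_smaller_loop, just_smaller_alt_search]
      rw [if_pos h, if_neg hne]
      simp only [← hmiddef, ← hm, hAget, hBget, hsegR, hsegL]
      by_cases hv : seg[m]'hmlt ≤ e
      · rw [if_pos hv, if_pos hv]
        exact ih (seg[m]'hmlt) (mid + 1) high (by omega) (by omega) hhigh
      · rw [if_neg hv, if_neg hv]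
        exact ih pos low (mid - 1) (by omega) (by omega) (by omega)
    · -- low > high: loop exits, segment is empty
      have hz : (high + 1 - low).toNat = 0 := by omega
      rw [just_smaller_loop, if_neg h, hz]
      rw [just_smaller_alt_search, if_pos (by simp)]

-- ===== VERDICT (by name: the statement is the Claim_ definition above) =====
theorem just_smaller_spec : Claim_equal_just_smaller := by
  intro a e _
  unfold Spec_just_smaller just_smaller just_smaller_alt
  rw [loop_eq_search a e (a.length + 1) (-1) 0 ((a.length : Int) - 1)
    (by omega) (by omega) (by omega)]
  congr 1
  simp
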